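-- pv_equiv track=rewrite | github.com/Matthewyin/nssa_AiAgentPlatform | mcp_servers/network_mcp/tools/ping.py | _parse_ping_output
-- ===== SOURCE A (Python) =====
-- from typing import Dict, Any
--
-- def _parse_ping_output(output: str, system: str) -> Dict[str, Any]:
--     """
--     解析ping输出,提取统计信息
--
--     Args:
--         output: ping命令输出
--         system: 操作系统类型
--
--     Returns:
--         统计信息字典
--     """
--     summary = {}
--
--     try:
--         lines = output.split('\n')
--
--         # 查找统计信息行
--         for i, line in enumerate(lines):
--             # 丢包率
--             if 'packet loss' in line.lower() or '丢失' in line: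
--                 summary['packet_loss_line'] = line.strip()
--
--             # RTT统计 (Linux/macOS)
--             if 'rtt min/avg/max' in line.lower() or 'round-trip' in line.lower():
--                 summary['rtt_line'] = line.strip()
--
--             # Windows的统计信息
--             if '最短' in line or 'minimum' in line.lower():
--                 summary['rtt_line'] = line.strip()
--
--     except Exception:
--         pass  # 解析失败不影响主要功能
--
--     return summary
-- ===== SOURCE B (Python) =====
-- def _parse_ping_output(output: str, system: str):
--     """Pick each summary line directly: the last matching line of the output wins."""
--     lines = output.split('\n')
--
--     def last_match(pred):
--         return next((l for l in reversed(lines) if pred(l)), None)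
--
--     loss = last_match(lambda l: 'packet loss' in l.lower() or '丢失' in l)
--     rtt = last_match(lambda l: ('rtt min/avg/max' in l.lower() or 'round-trip' in l.lower()
--                                 or '最短' in l or 'minimum' in l.lower()))
--
--     summary = {}
--     if loss is not None:
--         summary['packet_loss_line'] = loss.strip()
--     if rtt is not None:
--         summary['rtt_line'] = rtt.strip()
--     return summary
-- ===== Notes on version B (the rewrite author's own statement) =====
-- stated objective: alternative
-- what changed: A mutates a dict in one forward pass with last-wins overwrites; B scans in reverse once per key to take each key's last matching line directly and builds the dict in a fixed key order; Pre_ excludes outputs where both kinds of line occur and an rtt-summary line comes before every loss line, on which A's dict-insertion order (rtt_line first) is accidental iteration-order behaviour.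
import Mathlib
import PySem

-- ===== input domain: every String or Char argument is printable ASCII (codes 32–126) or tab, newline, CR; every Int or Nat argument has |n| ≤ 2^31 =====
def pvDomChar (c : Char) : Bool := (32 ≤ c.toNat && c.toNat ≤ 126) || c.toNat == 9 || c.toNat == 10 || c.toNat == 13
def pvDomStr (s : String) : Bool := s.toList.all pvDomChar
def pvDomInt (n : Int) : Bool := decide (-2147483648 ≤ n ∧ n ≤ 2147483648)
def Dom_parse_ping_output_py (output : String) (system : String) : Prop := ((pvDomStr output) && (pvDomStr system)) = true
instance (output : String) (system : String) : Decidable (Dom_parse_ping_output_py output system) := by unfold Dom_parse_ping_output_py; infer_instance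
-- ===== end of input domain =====

-- B replaces A's forward dict-mutation pass by one reverse scan per key (last match wins
-- directly) and builds the result in a fixed key order (objective: alternative, same cost).

-- ===== PORT A =====
-- A's loop body: three conditional last-wins inserts into the summary dict.
def pvPingStep (summary : PySem.Dict String String) (line : String) : PySem.Dict String String :=
  let summary := if PySem.Str.isIn "packet loss" (PySem.Str.lower line) || PySem.Str.isIn "丢失" line then
      summary.insert "packet_loss_line" (PySem.Str.strip line) else summary
  let summary := if PySem.Str.isIn "rtt min/avg/max" (PySem.Str.lower line) || PySem.Str.isIn "round-trip" (PySem.Str.lower line) then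
      summary.insert "rtt_line" (PySem.Str.strip line) else summary
  let summary := if PySem.Str.isIn "最短" line || PySem.Str.isIn "minimum" (PySem.Str.lower line) then
      summary.insert "rtt_line" (PySem.Str.strip line) else summary
  summary

def parse_ping_output_py (output : String) (system : String) : List (String × String) :=
  let lines := (PySem.Str.split? output "\n").getD []  -- sep "\n" ≠ "": split? is some here
  (lines.foldl pvPingStep PySem.Dict.empty).items

-- ===== PORT B =====
def pvIsPL (line : String) : Bool :=
  PySem.Str.isIn "packet loss" (PySem.Str.lower line) || PySem.Str.isIn "丢失" line

def pvIsRTT (line : String) : Bool :=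
  PySem.Str.isIn "rtt min/avg/max" (PySem.Str.lower line) || PySem.Str.isIn "round-trip" (PySem.Str.lower line)
    || PySem.Str.isIn "最短" line || PySem.Str.isIn "minimum" (PySem.Str.lower line)

def parse_ping_output_py_alt (output : String) (system : String) : List (String × String) :=
  let lines := (PySem.Str.split? output "\n").getD []  -- sep "\n" ≠ "": split? is some here
  let loss := lines.reverse.find? pvIsPL
  let rtt := lines.reverse.find? pvIsRTT
  let summary : PySem.Dict String String := PySem.Dict.empty
  let summary := match loss with
    | some l => summary.insert "packet_loss_line" (PySem.Str.strip l)
    | none => summary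
  let summary := match rtt with
    | some l => summary.insert "rtt_line" (PySem.Str.strip l)
    | none => summary
  summary.items

-- ===== PRECONDITION & SPEC =====
-- predicates restated for Pre_ so that Pre_'s closure is independent of both ports
def pvPreIsPL (line : String) : Bool :=
  PySem.Str.isIn "packet loss" (PySem.Str.lower line) || PySem.Str.isIn "丢失" line

def pvPreIsRTT (line : String) : Bool :=
  PySem.Str.isIn "rtt min/avg/max" (PySem.Str.lower line) || PySem.Str.isIn "round-trip" (PySem.Str.lower line)
    || PySem.Str.isIn "最短" line || PySem.Str.isIn "minimum" (PySem.Str.lower line)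

-- Pre_ excludes outputs in which both a packet-loss line and an rtt-summary line occur but
-- the first matching line is an rtt-only line: there A's dict lists rtt_line before
-- packet_loss_line, an accidental iteration-order artefact, while B uses a fixed key order.
def Pre_parse_ping_output_py (output : String) (system : String) : Prop :=
  let lines := (PySem.Str.split? output "\n").getD []
  (lines.any pvPreIsPL && lines.any pvPreIsRTT) = true →
    ((lines.find? (fun l => pvPreIsPL l || pvPreIsRTT l)).all pvPreIsPL) = true
instance (output : String) (system : String) : Decidable (Pre_parse_ping_output_py output system) := by unfold Pre_parse_ping_output_py; infer_instance

def pvWitness_parse_ping_output_py : String × String := ("0% packet loss\nround-trip 1/2/3 ms", "linux")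

def Spec_parse_ping_output_py (output : String) (system : String) (out : List (String × String)) : Prop := out = parse_ping_output_py_alt output system
instance (output : String) (system : String) (out : List (String × String)) : Decidable (Spec_parse_ping_output_py output system out) := by unfold Spec_parse_ping_output_py; infer_instance

-- ===== CLAIM (what is proved, stated in full; the proofs are below) =====
def Claim_equal_parse_ping_output_py : Prop := ∀ (output : String) (system : String), Dom_parse_ping_output_py output system → Pre_parse_ping_output_py output system → Spec_parse_ping_output_py output system (parse_ping_output_py output system)

-- ===== LEMMAS AND PROOFS =====
lemma pvPre_eq_PL : pvPreIsPL = pvIsPL := rfl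
lemma pvPre_eq_RTT : pvPreIsRTT = pvIsRTT := rfl

-- what A's fold produces, as a function of the reverse-first matches and the forward-first match
def pvAssemble (pl? : Option String) (rt? : Option String) (first? : Option String) : List (String × String) :=
  match pl?, rt? with
  | none, none => []
  | none, some rt => [("rtt_line", PySem.Str.strip rt)]
  | some pl, none => [("packet_loss_line", PySem.Str.strip pl)]
  | some pl, some rt =>
    match first? with
    | some f =>
        if pvIsPL f then
          [("packet_loss_line", PySem.Str.strip pl), ("rtt_line", PySem.Str.strip rt)]
        else
          [("rtt_line", PySem.Str.strip rt), ("packet_loss_line", PySem.Str.strip pl)]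
    | none => []  -- unreachable when pl?/rt? come from matches in the same list

-- A's step with its conditions phrased through B's predicates (the two rtt inserts collapse).
lemma pvPingStep_eq (d : PySem.Dict String String) (l : String) :
    pvPingStep d l =
      (let d1 := if pvIsPL l then d.insert "packet_loss_line" (PySem.Str.strip l) else d
       if pvIsRTT l then d1.insert "rtt_line" (PySem.Str.strip l) else d1) := by
  unfold pvPingStep pvIsPL pvIsRTT
  generalize PySem.Str.isIn "packet loss" (PySem.Str.lower l) = b1
  generalize PySem.Str.isIn "丢失" l = b2
  generalize PySem.Str.isIn "rtt min/avg/max" (PySem.Str.lower l) = b3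
  generalize PySem.Str.isIn "round-trip" (PySem.Str.lower l) = b4
  generalize PySem.Str.isIn "最短" l = b5
  generalize PySem.Str.isIn "minimum" (PySem.Str.lower l) = b6
  cases b1 <;> cases b2 <;> cases b3 <;> cases b4 <;> cases b5 <;> cases b6 <;>
    simp [PySem.Dict.insert_insert_self]

-- if some reversed suffix already found a match, the forward scan finds one too
lemma pv_q_some_of_rev_find {ls : List String} {a : String} {p : String → Bool}
    (h : ls.reverse.find? p = some a)
    (hpq : ∀ x, p x = true → (pvIsPL x || pvIsRTT x) = true) :
    ∃ f, ls.find? (fun x => pvIsPL x || pvIsRTT x) = some f := by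
  rcases hq : ls.find? (fun x => pvIsPL x || pvIsRTT x) with _ | f
  · exfalso
    have ha := List.find?_some h
    have ham : a ∈ ls := by have := List.mem_of_find?_eq_some h; simpa using this
    exact absurd (List.find?_eq_none.mp hq a ham) (by simp [hpq a ha])
  · exact ⟨f, rfl⟩

lemma pv_foldl_assemble (ls : List String) :
    ls.foldl pvPingStep (PySem.Dict.mk []) =
      PySem.Dict.mk (pvAssemble (ls.reverse.find? pvIsPL) (ls.reverse.find? pvIsRTT)
        (ls.find? (fun l => pvIsPL l || pvIsRTT l))) := by
  induction ls using List.reverseRecOn with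
  | nil => rfl
  | append_singleton ls l ih =>
    rw [List.foldl_append, List.foldl_cons, List.foldl_nil, ih, pvPingStep_eq]
    rw [show (ls ++ [l]).reverse = l :: ls.reverse by simp]
    rw [List.find?_append]
    rcases hP : ls.reverse.find? pvIsPL with _ | a <;>
      rcases hR : ls.reverse.find? pvIsRTT with _ | b
    · -- no match yet at all
      have hq : ls.find? (fun x => pvIsPL x || pvIsRTT x) = none := by
        rw [List.find?_eq_none]
        intro x hx
        have h1 := List.find?_eq_none.mp hP x (by simpa using hx)
        have h2 := List.find?_eq_none.mp hR x (by simpa using hx)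
        simp at h1 h2; simp [h1, h2]
      rw [hq]
      cases hPl : pvIsPL l <;> cases hRl : pvIsRTT l <;>
        simp [hPl, hRl, pvAssemble, hP, hR] <;> rfl
    · -- only rtt matched so far
      obtain ⟨f, hq⟩ := pv_q_some_of_rev_find hR (fun x hx => by simp [hx])
      have hfP : pvIsPL f = false := by
        have hfm : f ∈ ls := by have := List.mem_of_find?_eq_some hq; simpa using this
        have := List.find?_eq_none.mp hP f (by simpa using hfm)
        simpa using this
      rw [hq]
      cases hPl : pvIsPL l <;> cases hRl : pvIsRTT l <;>
        simp [hPl, hRl, pvAssemble, hP, hR, hfP] <;> rfl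
    · -- only packet loss matched so far
      obtain ⟨f, hq⟩ := pv_q_some_of_rev_find hP (fun x hx => by simp [hx])
      have hfP : pvIsPL f = true := by
        have hqf := List.find?_some hq
        have hfm : f ∈ ls := by have := List.mem_of_find?_eq_some hq; simpa using this
        have := List.find?_eq_none.mp hR f (by simpa using hfm)
        simp_all
      rw [hq]
      cases hPl : pvIsPL l <;> cases hRl : pvIsRTT l <;>
        simp [hPl, hRl, pvAssemble, hP, hR, hfP] <;> rfl
    · -- both matched already
      obtain ⟨f, hq⟩ := pv_q_some_of_rev_find hP (fun x hx => by simp [hx])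
      rw [hq]
      cases hPf : pvIsPL f <;> cases hPl : pvIsPL l <;> cases hRl : pvIsRTT l <;>
        simp [hPl, hRl, pvAssemble, hP, hR, hPf] <;> rfl

-- any-match on the list forces the reverse find to succeed (and conversely)
lemma pv_any_iff_rev_find_isSome (ls : List String) (p : String → Bool) :
    ls.any p = true ↔ (ls.reverse.find? p).isSome := by
  rw [List.find?_isSome]
  simp [List.any_eq_true]

-- ===== VERDICT (by name: the statement is the Claim_ definition above) =====
theorem parse_ping_output_py_spec : Claim_equal_parse_ping_output_py := by
  intro output system _ hpre
  unfold Spec_parse_ping_output_py parse_ping_output_py parse_ping_output_py_alt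
  unfold Pre_parse_ping_output_py at hpre
  rw [pvPre_eq_PL, pvPre_eq_RTT] at hpre
  set ls := (PySem.Str.split? output "\n").getD [] with hls
  show (PySem.Dict.items _) = _
  rw [show (PySem.Dict.empty : PySem.Dict String String) = PySem.Dict.mk [] from rfl,
      pv_foldl_assemble]
  rcases hP : ls.reverse.find? pvIsPL with _ | a <;>
    rcases hR : ls.reverse.find? pvIsRTT with _ | b
  · simp [pvAssemble, hP, hR]
  · simp only [pvAssemble, hP, hR]; rfl
  · simp only [pvAssemble, hP, hR]; rfl
  · -- both present: Pre_ gives that the forward first match is a packet-loss line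
    have hPa : ls.any pvIsPL = true := by
      rw [pv_any_iff_rev_find_isSome]; simp [hP]
    have hRa : ls.any pvIsRTT = true := by
      rw [pv_any_iff_rev_find_isSome]; simp [hR]
    obtain ⟨f, hq⟩ := pv_q_some_of_rev_find hP (fun x hx => by simp [hx])
    have hf : pvIsPL f = true := by
      have := hpre (by simp [hPa, hRa])
      rw [hq] at this; simpa using this
    simp only [pvAssemble, hP, hR, hq, hf, if_true]
    rfl
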